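-- pv_equiv track=rewrite | github.com/panly2003/IOT_communication | utils.py | closest_letter
-- ===== SOURCE A (Python) =====
-- def int_to_bit(num):
--     seq = []
--     for i in range(8):
--         seq.append((num >> (7 - i)) & 1)
--     return seq
--
-- def closest_letter(chunk):
--     # 大写字母的Unicode范围
--     uppercase_range = range(65, 91)
--     # 小写字母的Unicode范围
--     lowercase_range = range(97, 123)
--
--     def count_matching_bits(char_code, chunk):
--         # 将字符的Unicode编码转换为8位二进制字符串
--         char_binary = int_to_bit(char_code)
--         # 按位比较并计算相同的个数
--         return sum(c1 == c2 for c1, c2 in zip(char_binary, chunk))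
--
--     # 初始化最大匹配位数和最相近的字母
--     max_matching_bits = 0
--     closest_letter = None
--
--     # 遍历大写字母
--     for code in uppercase_range:
--         matching_bits = count_matching_bits(code, chunk)
--         if matching_bits > max_matching_bits:
--             max_matching_bits = matching_bits
--             closest_letter = chr(code)
--
--     # 遍历小写字母
--     for code in lowercase_range:
--         matching_bits = count_matching_bits(code, chunk)
--         if matching_bits > max_matching_bits:
--             max_matching_bits = matching_bits
--             closest_letter = chr(code)
--
--     # 返回最相近的字母
--     return closest_letter
-- ===== SOURCE B (Python) =====
-- def closest_letter(chunk):
--     # Pack the chunk's 0/1 entries into an integer `v` with a validity `mask`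
--     # (non-bit entries can never match any letter bit, so they stay unmasked).
--     v = 0
--     mask = 0
--     for i, b in enumerate(chunk[:8]):
--         if b == 0 or b == 1:
--             v |= b << (7 - i)
--             mask |= 1 << (7 - i)
--     best = None
--     best_score = 0
--     for code in list(range(65, 91)) + list(range(97, 123)):
--         score = (mask ^ ((code ^ v) & mask)).bit_count()
--         if score > best_score:
--             best_score = score
--             best = chr(code)
--     return best
-- ===== Notes on version B (the rewrite author's own statement) =====
-- stated objective: alternative
-- what changed: Instead of building an 8-bit list per letter and zip-comparing it with the chunk, B packs the chunk's 0/1 entries once into an integer value and validity mask and scores each of the 52 letters with a single XOR/AND/popcount.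
import Mathlib
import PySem

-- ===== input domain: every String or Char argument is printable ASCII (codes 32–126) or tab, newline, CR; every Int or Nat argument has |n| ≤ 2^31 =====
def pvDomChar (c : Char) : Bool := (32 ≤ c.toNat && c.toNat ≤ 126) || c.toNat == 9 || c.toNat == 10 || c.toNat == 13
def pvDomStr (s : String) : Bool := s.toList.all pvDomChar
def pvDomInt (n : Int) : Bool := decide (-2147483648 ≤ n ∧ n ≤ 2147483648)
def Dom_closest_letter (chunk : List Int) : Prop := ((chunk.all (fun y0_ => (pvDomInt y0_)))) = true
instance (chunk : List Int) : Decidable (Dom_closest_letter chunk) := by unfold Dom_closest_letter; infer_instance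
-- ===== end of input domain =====

-- B replaces A's per-letter 8-bit-list building and zip comparison by packing the chunk once
-- into an integer value plus validity mask and scoring each letter with XOR and popcount
-- (objective: alternative — same winner and same first-maximum tie-breaking as A).

-- ===== PORT A =====
def int_to_bit (num : Int) : List Int :=
  (PySem.List.pyRange 0 8 1).foldl
    (fun seq i => seq ++ [PySem.Int.band (num >>> (7 - i).toNat) 1]) []

def count_matching_bits (char_code : Int) (chunk : List Int) : Int :=
  ((int_to_bit char_code).zip chunk).foldl
    (fun acc p => acc + (if p.1 = p.2 then 1 else 0)) 0

-- chr(code) is String.ofList [Char.ofNat code.toNat]: exact for the ASCII codes 65..122 used here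
def closest_letter (chunk : List Int) : Option String :=
  let st1 := (PySem.List.pyRange 65 91 1).foldl (fun (st : Int × Option String) code =>
    let m := count_matching_bits code chunk
    if m > st.1 then (m, some (String.ofList [Char.ofNat code.toNat])) else st) (0, none)
  let st2 := (PySem.List.pyRange 97 123 1).foldl (fun (st : Int × Option String) code =>
    let m := count_matching_bits code chunk
    if m > st.1 then (m, some (String.ofList [Char.ofNat code.toNat])) else st) st1
  st2.2

-- ===== PORT B =====
-- Python's `n << k` / `|` / `^` / `&` / `.bit_count()` are `<<<` / PySem.Int.bor / bxor / band / bitCount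
def closest_letter_alt (chunk : List Int) : Option String :=
  let vm := (PySem.List.enumerate (PySem.List.slice chunk none (some 8)) 0).foldl
    (fun (st : Int × Int) (p : Int × Int) =>
      if p.2 = 0 ∨ p.2 = 1 then
        (PySem.Int.bor st.1 (p.2 <<< (7 - p.1).toNat), PySem.Int.bor st.2 ((1:Int) <<< (7 - p.1).toNat))
      else st) (0, 0)
  ((PySem.List.pyRange 65 91 1 ++ PySem.List.pyRange 97 123 1).foldl
    (fun (st : Int × Option String) code =>
      let score : Int := (PySem.Int.bitCount (PySem.Int.bxor vm.2 (PySem.Int.band (PySem.Int.bxor code vm.1) vm.2)) : Int)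
      if score > st.1 then (score, some (String.ofList [Char.ofNat code.toNat])) else st)
    (0, none)).2

-- ===== PRECONDITION & SPEC =====
def Spec_closest_letter (chunk : List Int) (out : Option String) : Prop := out = closest_letter_alt chunk
instance (chunk : List Int) (out : Option String) : Decidable (Spec_closest_letter chunk out) := by unfold Spec_closest_letter; infer_instance

-- ===== CLAIM (what is proved, stated in full; the proofs are below) =====
def Claim_equal_closest_letter : Prop := ∀ (chunk : List Int), Dom_closest_letter chunk → Spec_closest_letter chunk (closest_letter chunk)

-- ===== LEMMAS AND PROOFS =====

-- the letter bit A compares position i of the chunk against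
def bitv (c : Nat) (i : Nat) : Int := if c.testBit (7 - i) then 1 else 0

-- common middle form: number of positions of the (truncated) chunk matching letter c
def midScore (c : Nat) (s : List Int) : Nat :=
  ∑ i ∈ Finset.range 8, (if bitv c i = s.getD i 2 then 1 else 0)

lemma dead_term (c i : Nat) : (if bitv c i = (2:Int) then (1:Int) else 0) = 0 := by
  unfold bitv; split_ifs <;> simp_all

lemma band_shift (c t : Nat) :
    PySem.Int.band ((c : Int) >>> t) 1 = if c.testBit t then 1 else 0 := by
  have h0 : ((c : Int) >>> t) = ((c >>> t : Nat) : Int) := rfl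
  have h1 : (1 : Int) = ((1 : Nat) : Int) := rfl
  rw [h0, h1, PySem.Int.band_natCast, Nat.and_one_is_mod]
  rcases Nat.mod_two_eq_zero_or_one (c >>> t) with h | h <;>
    simp [h, Nat.testBit, Nat.one_and_eq_mod_two]

lemma int_to_bit_natCast (c : Nat) :
    int_to_bit (c : Int) =
      [bitv c 0, bitv c 1, bitv c 2, bitv c 3, bitv c 4, bitv c 5, bitv c 6, bitv c 7] := by
  have hr : PySem.List.pyRange 0 8 1 = [0, 1, 2, 3, 4, 5, 6, 7] := by decide
  unfold int_to_bit
  rw [hr]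
  norm_num [bitv]
  exact ⟨band_shift c 7, band_shift c 6, band_shift c 5, band_shift c 4,
         band_shift c 3, band_shift c 2, band_shift c 1,
         (band_shift c 0).trans (by simp [Nat.testBit_zero])⟩

-- A's score equals the middle form
lemma countA (c : Nat) (chunk : List Int) :
    count_matching_bits (c : Int) chunk = (midScore c (chunk.take 8) : Int) := by
  rcases chunk with _ | ⟨x0, _ | ⟨x1, _ | ⟨x2, _ | ⟨x3, _ | ⟨x4, _ | ⟨x5, _ | ⟨x6, _ | ⟨x7, t⟩⟩⟩⟩⟩⟩⟩⟩ <;>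
    · simp only [count_matching_bits, int_to_bit_natCast, midScore, Finset.sum_range_succ,
        Finset.sum_range_zero, List.take, List.zip, List.zipWith, List.foldl, List.getD,
        List.getElem?_cons_zero, List.getElem?_cons_succ, List.getElem?_nil, Option.getD]
      push_cast
      simp only [dead_term]
      try ring

-- splitting the position-existential of a cons cell
lemma exists_cons_shift (x : Int) (r : List Int) (j k : Nat) (Q : Int → Prop) :
    (∃ i : Fin (x :: r).length, j + i.1 + k = 7 ∧ Q ((x :: r).get i)) ↔
      ((j + k = 7 ∧ Q x) ∨ ∃ i : Fin r.length, (j + 1) + i.1 + k = 7 ∧ Q (r.get i)) := by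
  constructor
  · rintro ⟨⟨iv, hiv⟩, hik, hQ⟩
    cases iv with
    | zero => exact Or.inl ⟨by have h : j + 0 + k = 7 := hik; omega, hQ⟩
    | succ n =>
      exact Or.inr ⟨⟨n, by have h : n + 1 < r.length + 1 := hiv; omega⟩,
        by show j + 1 + n + k = 7; have h : j + (n + 1) + k = 7 := hik; omega, hQ⟩
  · rintro (⟨h7, hQ⟩ | ⟨i, hik, hQ⟩)
    · exact ⟨⟨0, by simp⟩, by show j + 0 + k = 7; omega, hQ⟩
    · exact ⟨⟨i.1 + 1, by have := i.isLt; simp only [List.length_cons]; omega⟩,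
        by show j + (i.1 + 1) + k = 7; omega, hQ⟩

lemma ecs1 (x : Int) (r : List Int) (j k : Nat) :
    (∃ i : Fin (x :: r).length, j + i.1 + k = 7 ∧ (x :: r).get i = 1) ↔
      ((j + k = 7 ∧ x = 1) ∨ ∃ i : Fin r.length, (j + 1) + i.1 + k = 7 ∧ r.get i = 1) :=
  exists_cons_shift x r j k (fun y => y = 1)

lemma ecs01 (x : Int) (r : List Int) (j k : Nat) :
    (∃ i : Fin (x :: r).length, j + i.1 + k = 7 ∧ ((x :: r).get i = 0 ∨ (x :: r).get i = 1)) ↔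
      ((j + k = 7 ∧ (x = 0 ∨ x = 1)) ∨ ∃ i : Fin r.length, (j + 1) + i.1 + k = 7 ∧ (r.get i = 0 ∨ r.get i = 1)) :=
  exists_cons_shift x r j k (fun y => y = 0 ∨ y = 1)

-- characterisation of B's packing fold: the bits of value and mask
lemma fold_spec (s : List Int) (j v m : Nat) (hj : j + s.length ≤ 8) :
    ∃ vN mN : Nat,
      ((PySem.List.enumerate s (j : Int)).foldl
        (fun (st : Int × Int) (p : Int × Int) =>
          if p.2 = 0 ∨ p.2 = 1 then
            (PySem.Int.bor st.1 (p.2 <<< (7 - p.1).toNat), PySem.Int.bor st.2 ((1:Int) <<< (7 - p.1).toNat))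
          else st) ((v : Int), (m : Int))) = ((vN : Int), (mN : Int)) ∧
      (∀ k : Nat, (vN.testBit k = true ↔
        v.testBit k = true ∨ ∃ i : Fin s.length, j + i.1 + k = 7 ∧ s.get i = 1)) ∧
      (∀ k : Nat, (mN.testBit k = true ↔
        m.testBit k = true ∨ ∃ i : Fin s.length, j + i.1 + k = 7 ∧ (s.get i = 0 ∨ s.get i = 1))) := by
  induction s generalizing j v m with
  | nil =>
    refine ⟨v, m, by simp [PySem.List.enumerate_nil], fun k => by simp, fun k => by simp⟩
  | cons x r ih =>
    have hj7 : j ≤ 7 := by simp at hj; omega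
    have hlen : (j + 1) + r.length ≤ 8 := by simp at hj; omega
    have ht : ((7 : Int) - (j : Int)).toNat = 7 - j := by omega
    have hcast : ((j : Int) + 1) = (((j + 1 : Nat)) : Int) := by push_cast; ring
    rw [PySem.List.enumerate_cons, List.foldl_cons, hcast]
    have hbitor : ∀ (a k : Nat), ((a ||| (1 <<< (7 - j))).testBit k = true ↔
        a.testBit k = true ∨ j + k = 7) := by
      intro a k
      simp only [Nat.testBit_or, Nat.one_shiftLeft, Nat.testBit_two_pow, Bool.or_eq_true,
        decide_eq_true_eq]
      rw [show (7 - j = k) ↔ (j + k = 7) from by omega]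
    by_cases hx : x = 0 ∨ x = 1
    · rcases hx with rfl | rfl
      · -- x = 0 : value unchanged, mask gains bit 7 - j
        have hstep0 : (if (0 : Int) = 0 ∨ (0 : Int) = 1 then
              (PySem.Int.bor (v : Int) ((0 : Int) <<< ((7 : Int) - (j : Int)).toNat),
                PySem.Int.bor (m : Int) ((1 : Int) <<< ((7 : Int) - (j : Int)).toNat))
            else ((v : Int), (m : Int))) = ((v : Int), ((m ||| (1 <<< (7 - j)) : Nat) : Int)) := by
          rw [if_pos (Or.inl rfl), ht]
          rw [show ((0:Int) <<< (7 - j)) = (((0 <<< (7 - j) : Nat)) : Int) from rfl,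
              show ((1:Int) <<< (7 - j)) = (((1 <<< (7 - j) : Nat)) : Int) from rfl,
              PySem.Int.bor_natCast, PySem.Int.bor_natCast, Nat.zero_shiftLeft]
          simp
        have hstep : (if ((j : Int), (0 : Int)).2 = 0 ∨ ((j : Int), (0 : Int)).2 = 1 then
              (PySem.Int.bor ((v : Int), (m : Int)).1 (((j : Int), (0 : Int)).2 <<< (7 - ((j : Int), (0 : Int)).1).toNat),
                PySem.Int.bor ((v : Int), (m : Int)).2 ((1 : Int) <<< (7 - ((j : Int), (0 : Int)).1).toNat))
            else ((v : Int), (m : Int))) = ((v : Int), ((m ||| (1 <<< (7 - j)) : Nat) : Int)) := hstep0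
        rw [hstep]
        obtain ⟨vN, mN, heq, hv, hm⟩ := ih (j + 1) v (m ||| (1 <<< (7 - j))) hlen
        refine ⟨vN, mN, heq, ?_, ?_⟩
        · intro k
          rw [hv k, ecs1 0 r j k]
          simp only [show ((0:Int) = 1) ↔ False by norm_num, and_false, false_or]
        · intro k
          rw [hm k, ecs01 0 r j k, hbitor]
          constructor
          · rintro ((h | h) | h)
            · exact Or.inl h
            · exact Or.inr (Or.inl ⟨h, Or.inl rfl⟩)
            · exact Or.inr (Or.inr h)
          · rintro (h | (⟨h7, _⟩ | h))
            · exact Or.inl (Or.inl h)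
            · exact Or.inl (Or.inr h7)
            · exact Or.inr h
      · -- x = 1 : both value and mask gain bit 7 - j
        have hstep0 : (if (1 : Int) = 0 ∨ (1 : Int) = 1 then
              (PySem.Int.bor (v : Int) ((1 : Int) <<< ((7 : Int) - (j : Int)).toNat),
                PySem.Int.bor (m : Int) ((1 : Int) <<< ((7 : Int) - (j : Int)).toNat))
            else ((v : Int), (m : Int))) = (((v ||| (1 <<< (7 - j)) : Nat) : Int), ((m ||| (1 <<< (7 - j)) : Nat) : Int)) := by
          rw [if_pos (Or.inr rfl), ht]
          rw [show ((1:Int) <<< (7 - j)) = (((1 <<< (7 - j) : Nat)) : Int) from rfl,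
              PySem.Int.bor_natCast, PySem.Int.bor_natCast]
        have hstep : (if ((j : Int), (1 : Int)).2 = 0 ∨ ((j : Int), (1 : Int)).2 = 1 then
              (PySem.Int.bor ((v : Int), (m : Int)).1 (((j : Int), (1 : Int)).2 <<< (7 - ((j : Int), (1 : Int)).1).toNat),
                PySem.Int.bor ((v : Int), (m : Int)).2 ((1 : Int) <<< (7 - ((j : Int), (1 : Int)).1).toNat))
            else ((v : Int), (m : Int))) = (((v ||| (1 <<< (7 - j)) : Nat) : Int), ((m ||| (1 <<< (7 - j)) : Nat) : Int)) := hstep0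
        rw [hstep]
        obtain ⟨vN, mN, heq, hv, hm⟩ := ih (j + 1) (v ||| (1 <<< (7 - j))) (m ||| (1 <<< (7 - j))) hlen
        refine ⟨vN, mN, heq, ?_, ?_⟩
        · intro k
          rw [hv k, ecs1 1 r j k, hbitor]
          constructor
          · rintro ((h | h) | h)
            · exact Or.inl h
            · exact Or.inr (Or.inl ⟨h, rfl⟩)
            · exact Or.inr (Or.inr h)
          · rintro (h | (⟨h7, _⟩ | h))
            · exact Or.inl (Or.inl h)
            · exact Or.inl (Or.inr h7)
            · exact Or.inr h
        · intro k
          rw [hm k, ecs01 1 r j k, hbitor]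
          constructor
          · rintro ((h | h) | h)
            · exact Or.inl h
            · exact Or.inr (Or.inl ⟨h, Or.inr rfl⟩)
            · exact Or.inr (Or.inr h)
          · rintro (h | (⟨h7, _⟩ | h))
            · exact Or.inl (Or.inl h)
            · exact Or.inl (Or.inr h7)
            · exact Or.inr h
    · -- x is not a bit : state unchanged
      have hx0 : ¬ (x = 0) := fun h => hx (Or.inl h)
      have hx1 : ¬ (x = 1) := fun h => hx (Or.inr h)
      have hstep0 : (if x = 0 ∨ x = 1 then
              (PySem.Int.bor (v : Int) (x <<< ((7 : Int) - (j : Int)).toNat),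
                PySem.Int.bor (m : Int) ((1 : Int) <<< ((7 : Int) - (j : Int)).toNat))
            else ((v : Int), (m : Int))) = ((v : Int), (m : Int)) := by
        rw [if_neg hx]
      have hstep : (if ((j : Int), x).2 = 0 ∨ ((j : Int), x).2 = 1 then
              (PySem.Int.bor ((v : Int), (m : Int)).1 (((j : Int), x).2 <<< (7 - ((j : Int), x).1).toNat),
                PySem.Int.bor ((v : Int), (m : Int)).2 ((1 : Int) <<< (7 - ((j : Int), x).1).toNat))
            else ((v : Int), (m : Int))) = ((v : Int), (m : Int)) := hstep0
      rw [hstep]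
      obtain ⟨vN, mN, heq, hv, hm⟩ := ih (j + 1) v m hlen
      refine ⟨vN, mN, heq, ?_, ?_⟩
      · intro k
        rw [hv k, ecs1 x r j k]
        simp only [hx1, and_false, false_or]
      · intro k
        rw [hm k, ecs01 x r j k]
        simp only [hx0, hx1, or_self, and_false, false_or]

lemma bitCount_sum (L : Nat) : ∀ m : Nat, m < 2 ^ L →
    PySem.Int.bitCount (m : Int) = ∑ k ∈ Finset.range L, (if m.testBit k then 1 else 0) := by
  induction L with
  | zero =>
    intro m hm
    interval_cases m
    simp [PySem.Int.bitCount_zero]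
  | succ L ih =>
    intro m hm
    rcases Nat.eq_zero_or_pos m with h0 | h0
    · subst h0; simp [PySem.Int.bitCount_zero, Nat.zero_testBit]
    · rw [PySem.Int.bitCount_natCast h0, Finset.sum_range_succ']
      have hdiv : m / 2 < 2 ^ L := by
        have : (2:Nat) ^ (L + 1) = 2 ^ L * 2 := by ring
        omega
      rw [ih (m / 2) hdiv]
      have hb : ∀ k, m.testBit (k + 1) = (m / 2).testBit k := fun k => Nat.testBit_add_one m k
      simp only [hb, Nat.testBit_zero]
      rcases Nat.mod_two_eq_zero_or_one m with h | h <;> simp [h] <;> omega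

-- B's score equals the middle form
lemma countB (c : Nat) (s : List Int) (vN mN : Nat)
    (hv : ∀ k : Nat, (vN.testBit k = true ↔ ∃ i : Fin s.length, i.1 + k = 7 ∧ s.get i = 1))
    (hm : ∀ k : Nat, (mN.testBit k = true ↔ ∃ i : Fin s.length, i.1 + k = 7 ∧ (s.get i = 0 ∨ s.get i = 1))) :
    PySem.Int.bitCount ((mN ^^^ ((c ^^^ vN) &&& mN) : Nat) : Int) = midScore c s := by
  have hXbit : ∀ k : Nat, ((mN ^^^ ((c ^^^ vN) &&& mN)).testBit k = true ↔
      ∃ i : Fin s.length, i.1 + k = 7 ∧ bitv c i.1 = s.get i) := by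
    intro k
    rw [Nat.testBit_xor, Nat.testBit_and, Nat.testBit_xor]
    by_cases hmk : mN.testBit k = true
    · obtain ⟨i0, hi0, hP⟩ := (hm k).mp hmk
      have huniq : ∀ i : Fin s.length, i.1 + k = 7 → i = i0 := fun i hi => Fin.ext (by omega)
      have hvb : vN.testBit k = true ↔ s.get i0 = 1 := by
        rw [hv k]
        constructor
        · rintro ⟨i, hik, h1⟩; rwa [huniq i hik] at h1
        · intro h1; exact ⟨i0, hi0, h1⟩
      have hbv : bitv c i0.1 = if c.testBit k then 1 else 0 := by
        have hk : 7 - i0.1 = k := by omega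
        unfold bitv
        rw [hk]
      constructor
      · intro hX
        refine ⟨i0, hi0, ?_⟩
        rw [hbv]
        rcases hP with h0 | h0 <;>
          rw [h0] at hvb <;>
          cases hc : c.testBit k <;> cases hvN' : vN.testBit k <;>
            simp_all
      · rintro ⟨i, hik, hb⟩
        rw [huniq i hik, hbv] at hb
        rcases hP with h0 | h0 <;>
          rw [h0] at hb hvb <;>
          cases hc : c.testBit k <;> cases hvN' : vN.testBit k <;>
            simp_all
    · have hrhs : ¬ ∃ i : Fin s.length, i.1 + k = 7 ∧ bitv c i.1 = s.get i := by
        rintro ⟨i, hik, hb⟩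
        apply hmk
        refine (hm k).mpr ⟨i, hik, ?_⟩
        unfold bitv at hb
        split at hb
        · exact Or.inr hb.symm
        · exact Or.inl hb.symm
      simp only [Bool.not_eq_true] at hmk
      simp only [hmk, Bool.and_false, Bool.xor_false]
      exact iff_of_false (by simp) hrhs
  have hX8 : (mN ^^^ ((c ^^^ vN) &&& mN)) < 2 ^ 8 := by
    apply Nat.lt_pow_two_of_testBit
    intro i hi
    cases hXb : (mN ^^^ ((c ^^^ vN) &&& mN)).testBit i
    · rfl
    · obtain ⟨i', hik, _⟩ := (hXbit i).mp hXb
      omega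
  rw [bitCount_sum 8 _ hX8, ← Finset.sum_range_reflect]
  unfold midScore
  apply Finset.sum_congr rfl
  intro i hi
  simp only [Finset.mem_range] at hi
  rw [show (8 - 1 - i) = 7 - i by omega]
  have hiff : (mN ^^^ ((c ^^^ vN) &&& mN)).testBit (7 - i) = true ↔ bitv c i = s.getD i 2 := by
    rw [hXbit (7 - i)]
    constructor
    · rintro ⟨⟨iv, hlt⟩, hik, hb⟩
      have hieq : iv = i := by simp at hik; omega
      subst hieq
      rw [List.get_eq_getElem] at hb
      rw [List.getD_eq_getElem s 2 hlt]
      exact hb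
    · intro hb
      have hne2 : bitv c i ≠ 2 := by unfold bitv; split_ifs <;> norm_num
      have hilen : i < s.length := by
        by_contra hc
        rw [List.getD_eq_default s 2 (by omega)] at hb
        exact hne2 hb
      refine ⟨⟨i, hilen⟩, by simp; omega, ?_⟩
      rw [List.get_eq_getElem]
      rwa [List.getD_eq_getElem s 2 hilen] at hb
  by_cases hb : bitv c i = s.getD i 2
  · rw [if_pos (hiff.mpr hb), if_pos hb]
  · rw [if_neg (fun hX => hb (hiff.mp hX)), if_neg hb]

-- ===== VERDICT (by name: the statement is the Claim_ definition above) =====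
theorem closest_letter_spec : Claim_equal_closest_letter := by
  intro chunk _
  unfold Spec_closest_letter closest_letter closest_letter_alt
  have hslice : PySem.List.slice chunk none (some (8:Int)) = chunk.take 8 := by
    rw [PySem.List.slice_to chunk (by norm_num : (0:Int) ≤ 8)]
    rfl
  have hlen8 : (0:Nat) + (chunk.take 8).length ≤ 8 := by
    simp [List.length_take]
  obtain ⟨vN, mN, heq, hv0, hm0⟩ := fold_spec (chunk.take 8) 0 0 0 hlen8
  simp only [Nat.cast_zero] at heq
  have hv : ∀ k : Nat, (vN.testBit k = true ↔
      ∃ i : Fin (chunk.take 8).length, i.1 + k = 7 ∧ (chunk.take 8).get i = 1) := by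
    intro k; rw [hv0 k]; simp [Nat.zero_testBit]
  have hm : ∀ k : Nat, (mN.testBit k = true ↔
      ∃ i : Fin (chunk.take 8).length, i.1 + k = 7 ∧ ((chunk.take 8).get i = 0 ∨ (chunk.take 8).get i = 1)) := by
    intro k; rw [hm0 k]; simp [Nat.zero_testBit]
  have hscore : ∀ code : Int, 65 ≤ code → code < 123 →
      count_matching_bits code chunk =
        ((PySem.Int.bitCount (PySem.Int.bxor ((vN : Int), (mN : Int)).2
          (PySem.Int.band (PySem.Int.bxor code ((vN : Int), (mN : Int)).1) ((vN : Int), (mN : Int)).2))) : Int) := by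
    intro code h1 h2
    have hc : code = ((code.toNat : Nat) : Int) := by omega
    show count_matching_bits code chunk =
      ((PySem.Int.bitCount (PySem.Int.bxor (mN : Int)
        (PySem.Int.band (PySem.Int.bxor code (vN : Int)) (mN : Int)))) : Int)
    rw [hc, PySem.Int.bxor_natCast, PySem.Int.band_natCast, PySem.Int.bxor_natCast]
    rw [countA, countB code.toNat (chunk.take 8) vN mN hv hm]
  show ((PySem.List.pyRange 97 123 1).foldl (fun (st : Int × Option String) code =>
      let m := count_matching_bits code chunk
      if m > st.1 then (m, some (String.ofList [Char.ofNat code.toNat])) else st)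
      ((PySem.List.pyRange 65 91 1).foldl (fun (st : Int × Option String) code =>
        let m := count_matching_bits code chunk
        if m > st.1 then (m, some (String.ofList [Char.ofNat code.toNat])) else st) (0, none))).2 =
    ((PySem.List.pyRange 65 91 1 ++ PySem.List.pyRange 97 123 1).foldl
      (fun (st : Int × Option String) code =>
        let score : Int := (PySem.Int.bitCount (PySem.Int.bxor
          ((PySem.List.enumerate (PySem.List.slice chunk none (some 8)) 0).foldl
            (fun (st : Int × Int) (p : Int × Int) =>
              if p.2 = 0 ∨ p.2 = 1 then
                (PySem.Int.bor st.1 (p.2 <<< (7 - p.1).toNat), PySem.Int.bor st.2 ((1:Int) <<< (7 - p.1).toNat))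
              else st) (0, 0)).2
          (PySem.Int.band (PySem.Int.bxor code
            ((PySem.List.enumerate (PySem.List.slice chunk none (some 8)) 0).foldl
              (fun (st : Int × Int) (p : Int × Int) =>
                if p.2 = 0 ∨ p.2 = 1 then
                  (PySem.Int.bor st.1 (p.2 <<< (7 - p.1).toNat), PySem.Int.bor st.2 ((1:Int) <<< (7 - p.1).toNat))
                else st) (0, 0)).1)
            ((PySem.List.enumerate (PySem.List.slice chunk none (some 8)) 0).foldl
              (fun (st : Int × Int) (p : Int × Int) =>
                if p.2 = 0 ∨ p.2 = 1 then
                  (PySem.Int.bor st.1 (p.2 <<< (7 - p.1).toNat), PySem.Int.bor st.2 ((1:Int) <<< (7 - p.1).toNat))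
                else st) (0, 0)).2)) : Int)
        if score > st.1 then (score, some (String.ofList [Char.ofNat code.toNat])) else st)
      (0, none)).2
  rw [hslice, heq, List.foldl_append]
  have hcong : ∀ (l : List Int), (∀ x ∈ l, 65 ≤ x ∧ x < 123) → ∀ init : Int × Option String,
      l.foldl (fun (st : Int × Option String) code =>
        let m := count_matching_bits code chunk
        if m > st.1 then (m, some (String.ofList [Char.ofNat code.toNat])) else st) init =
      l.foldl (fun (st : Int × Option String) code =>
        let score : Int := (PySem.Int.bitCount (PySem.Int.bxor ((vN : Int), (mN : Int)).2
          (PySem.Int.band (PySem.Int.bxor code ((vN : Int), (mN : Int)).1) ((vN : Int), (mN : Int)).2)) : Int)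
        if score > st.1 then (score, some (String.ofList [Char.ofNat code.toNat])) else st) init := by
    intro l hl init
    refine PySem.List.foldl_congr_mem l _ _ init (fun acc x hx => ?_)
    obtain ⟨h1, h2⟩ := hl x hx
    show (let m := count_matching_bits x chunk
      if m > acc.1 then (m, some (String.ofList [Char.ofNat x.toNat])) else acc) = _
    rw [hscore x h1 h2]
  rw [hcong (PySem.List.pyRange 65 91 1)
        (fun x hx => by have := (PySem.List.mem_pyRange_one).mp hx; omega),
      hcong (PySem.List.pyRange 97 123 1)
        (fun x hx => by have := (PySem.List.mem_pyRange_one).mp hx; omega)]
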